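-- pv_equiv track=rewrite | github.com/JakeSaunders1995/comp16321MarkingMid | CW_spell/spellcheck_k47680dm/spellcheck_k47680dm.py | RemoveNumbers
-- ===== SOURCE A (Python) =====
-- def RemoveNumbers(sentence):
-- 	newSentence = ""
-- 	amountNumbers = 0
-- 	for i in range(len(sentence)):
-- 		if sentence[i] != " ":
-- 			if ord(sentence[i]) > 47 and ord(sentence[i]) < 58:
-- 				amountNumbers += 1
-- 			else:
-- 				newSentence += sentence[i]
-- 		else:
-- 			newSentence += sentence[i]
-- 	return amountNumbers, newSentence
-- ===== SOURCE B (Python) =====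
-- def RemoveNumbers(sentence):
--     # Divide and conquer: split in halves, solve each half, combine.
--     if len(sentence) <= 1:
--         if sentence and '0' <= sentence <= '9':
--             return 1, ''
--         return 0, sentence
--     mid = len(sentence) // 2
--     n1, s1 = RemoveNumbers(sentence[:mid])
--     n2, s2 = RemoveNumbers(sentence[mid:])
--     return n1 + n2, s1 + s2
-- ===== Notes on version B (the rewrite author's own statement) =====
-- stated objective: alternative
-- what changed: Replaces A's single left-to-right indexed scan with two running accumulators by a divide-and-conquer recursion: split the string at the midpoint, solve each half recursively, and combine by adding the digit counts and concatenating the filtered halves.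
import Mathlib
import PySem

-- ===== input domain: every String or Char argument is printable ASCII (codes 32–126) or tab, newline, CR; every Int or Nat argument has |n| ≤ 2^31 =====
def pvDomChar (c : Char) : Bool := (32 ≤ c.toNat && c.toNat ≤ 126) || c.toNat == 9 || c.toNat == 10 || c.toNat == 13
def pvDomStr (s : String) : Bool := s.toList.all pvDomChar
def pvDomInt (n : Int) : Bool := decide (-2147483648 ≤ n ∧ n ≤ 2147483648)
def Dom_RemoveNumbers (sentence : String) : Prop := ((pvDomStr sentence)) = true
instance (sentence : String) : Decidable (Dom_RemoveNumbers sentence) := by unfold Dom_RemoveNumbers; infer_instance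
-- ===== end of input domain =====

-- B replaces A's single left-to-right indexed scan by a divide-and-conquer recursion
-- (split at the midpoint, recurse on halves, add counts and concatenate results);
-- objective: alternative algorithm, same exact value.

-- ===== PORT A =====
-- A iterates i over range(len(sentence)) and reads sentence[i]; ported as a fold over
-- the character list in the same order, with the same (count, built-string) state and
-- the same branch structure (space test first, then the ord 47 < _ < 58 digit test).
def RemoveNumbers (sentence : String) : Int × String :=
  let st := sentence.toList.foldl
    (fun (st : Int × String) c =>
      if c ≠ ' ' then
        if 47 < c.toNat ∧ c.toNat < 58 then (st.1 + 1, st.2)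
        else (st.1, st.2.push c)
      else (st.1, st.2.push c))
    (0, "")
  (st.1, st.2)

-- ===== PORT B =====
-- Source B recurses on the string: length ≤ 1 is a base case, otherwise split at
-- len // 2 (slices sentence[:mid] / sentence[mid:] = take/drop) and combine.
def pvGoB (l : List Char) : Int × List Char :=
  if l.length ≤ 1 then
    match l with
    | [] => (0, [])
    | c :: rest => if '0' ≤ c ∧ c ≤ '9' then (1, []) else (0, c :: rest)
  else
    let mid := l.length / 2
    let p1 := pvGoB (l.take mid)
    let p2 := pvGoB (l.drop mid)
    (p1.1 + p2.1, p1.2 ++ p2.2)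
termination_by l.length
decreasing_by
  · simp only [List.length_take]; omega
  · simp only [List.length_drop]; omega

def RemoveNumbers_alt (sentence : String) : Int × String :=
  let p := pvGoB sentence.toList
  (p.1, String.ofList p.2)

-- ===== PRECONDITION & SPEC =====
def Spec_RemoveNumbers (sentence : String) (out : Int × String) : Prop := out = RemoveNumbers_alt sentence
instance (sentence : String) (out : Int × String) : Decidable (Spec_RemoveNumbers sentence out) := by unfold Spec_RemoveNumbers; infer_instance

-- ===== CLAIM (what is proved, stated in full; the proofs are below) =====
def Claim_equal_RemoveNumbers : Prop := ∀ (sentence : String), Dom_RemoveNumbers sentence → Spec_RemoveNumbers sentence (RemoveNumbers sentence)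

-- ===== LEMMAS AND PROOFS =====

-- Both programs' digit tests agree: 47 < ord c < 58 iff '0' ≤ c ≤ '9'.
theorem pv_digit_iff (c : Char) :
    decide (47 < c.toNat ∧ c.toNat < 58) = decide ('0' ≤ c ∧ c ≤ '9') := by
  have h1 : ('0' ≤ c) ↔ 48 ≤ c.toNat := ge_iff_le
  have h2 : (c ≤ '9') ↔ c.toNat ≤ 57 := ge_iff_le
  rw [decide_eq_decide, h1, h2]
  omega

-- A's loop invariant: the fold counts digits and appends non-digits in order.
theorem pv_loop_inv (l : List Char) (n : Int) (acc : String) :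
    l.foldl
      (fun (st : Int × String) c =>
        if c ≠ ' ' then
          if 47 < c.toNat ∧ c.toNat < 58 then (st.1 + 1, st.2)
          else (st.1, st.2.push c)
        else (st.1, st.2.push c))
      (n, acc)
    = (n + ((l.countP (fun c => decide ('0' ≤ c ∧ c ≤ '9'))) : Int),
       String.ofList (acc.toList ++ l.filter (fun c => !decide ('0' ≤ c ∧ c ≤ '9')))) := by
  induction l generalizing n acc with
  | nil => simp
  | cons c t ih =>
    rw [List.foldl_cons]
    by_cases hd : '0' ≤ c ∧ c ≤ '9'
    · have hd' : 47 < c.toNat ∧ c.toNat < 58 := by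
        have := pv_digit_iff c; simp [hd] at this; exact this
      have hsp : c ≠ ' ' := by rintro rfl; exact absurd hd (by decide)
      have hstep : (if c ≠ ' ' then
            if 47 < c.toNat ∧ c.toNat < 58 then ((n : Int) + 1, acc)
            else (n, acc.push c)
          else (n, acc.push c)) = (n + 1, acc) := by simp [hsp, hd']
      rw [hstep, ih]
      simp [hd]
      omega
    · have hd' : ¬ (47 < c.toNat ∧ c.toNat < 58) := by
        have := pv_digit_iff c; simp [hd] at this; omega
      have hstep : (if c ≠ ' ' then
            if 47 < c.toNat ∧ c.toNat < 58 then ((n : Int) + 1, acc)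
            else (n, acc.push c)
          else (n, acc.push c)) = (n, acc.push c) := by
        by_cases hsp : c = ' ' <;> simp [hsp, hd']
      rw [hstep, ih]
      rcases not_and_or.mp hd with h0 | h0 <;>
        simp [h0, String.toList_push]

-- B's recursion computes the same (digit count, filtered characters).
theorem pvGoB_eq (l : List Char) :
    pvGoB l = (((l.countP (fun c => decide ('0' ≤ c ∧ c ≤ '9'))) : Int),
               l.filter (fun c => !decide ('0' ≤ c ∧ c ≤ '9'))) := by
  induction l using pvGoB.induct with
  | case1 h => simp [pvGoB]
  | case2 c rest hd h =>
    have hr : rest = [] := by simp at h; omega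
    subst hr
    simp [pvGoB, hd]
  | case3 c rest hd h =>
    have hr : rest = [] := by simp at h; omega
    subst hr
    rcases not_and_or.mp hd with h0 | h0 <;> simp [pvGoB, h0]
  | case4 l h mid ih1 ih2 =>
    rw [pvGoB.eq_def, if_neg h]
    have hm : mid = l.length / 2 := rfl
    rw [hm] at ih1 ih2
    simp only [ih1, ih2]
    have hsplit : l.take (l.length / 2) ++ l.drop (l.length / 2) = l :=
      List.take_append_drop _ l
    rw [← Nat.cast_add, ← List.countP_append, ← List.filter_append, hsplit]

-- ===== VERDICT (by name: the statement is the Claim_ definition above) =====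
theorem RemoveNumbers_spec : Claim_equal_RemoveNumbers := by
  intro s _
  show _ = _
  simp only [RemoveNumbers, RemoveNumbers_alt, pv_loop_inv, pvGoB_eq]
  simp
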